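-- pv_equiv track=rewrite | github.com/yoshiayu/sekigae | app.py | _validate_layout_rows
-- ===== SOURCE A (Python) =====
-- _LAYOUT_ROW_LABELS = ("前列（スクリーン側）", "中列", "後列（後方）")
--
-- _LAYOUT_ROW_LIMITS = (4, 5, 4)
--
-- def _validate_layout_rows(layout_rows: list[list[int]], table_count: int) -> list[str]:
--     errors: list[str] = []
--     if len(layout_rows) != 3:
--         return ["レイアウト行数が不正です。前列・中列・後列の3行を設定してください。"]
--
--     for idx, (row, limit) in enumerate(zip(layout_rows, _LAYOUT_ROW_LIMITS)):
--         if len(row) > limit: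
--             errors.append(
--                 f"{_LAYOUT_ROW_LABELS[idx]}は最大{limit}テーブルまでです。"
--             )
--
--     flat = [no for row in layout_rows for no in row]
--     out_of_range = sorted({no for no in flat if no < 1 or no > table_count})
--     if out_of_range:
--         errors.append(
--             f"レイアウトに範囲外のテーブル番号があります: {', '.join(str(no) for no in out_of_range)}"
--         )
--
--     duplicates = sorted({no for no in flat if flat.count(no) > 1})
--     if duplicates:
--         errors.append(
--             f"レイアウトに重複テーブル番号があります: {', '.join(str(no) for no in duplicates)}"
--         )
--
--     expected = set(range(1, table_count + 1))
--     provided = set(flat)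
--     missing = sorted(expected - provided)
--     if missing:
--         errors.append(
--             f"レイアウト未指定のテーブルがあります: {', '.join(str(no) for no in missing)}"
--         )
--     return errors
-- ===== SOURCE B (Python) =====
-- _LAYOUT_ROW_LABELS = ("前列（スクリーン側）", "中列", "後列（後方）")
--
-- _LAYOUT_ROW_LIMITS = (4, 5, 4)
--
--
-- def _validate_layout_rows(layout_rows: list[list[int]], table_count: int) -> list[str]:
--     if len(layout_rows) != 3:
--         return ["レイアウト行数が不正です。前列・中列・後列の3行を設定してください。"]
--
--     errors: list[str] = []
--     for idx, (row, limit) in enumerate(zip(layout_rows, _LAYOUT_ROW_LIMITS)):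
--         if len(row) > limit:
--             errors.append(
--                 f"{_LAYOUT_ROW_LABELS[idx]}は最大{limit}テーブルまでです。"
--             )
--
--     # one sort, then a single run-length scan classifying each distinct value;
--     # the three result lists come out already sorted, with no sets or rescans
--     flat = sorted(no for row in layout_rows for no in row)
--     out_of_range: list[int] = []
--     present: list[int] = []       # sorted distinct in-range values
--     duplicates: list[int] = []
--     i = 0
--     n = len(flat)
--     while i < n:
--         j = i
--         while j < n and flat[j] == flat[i]:
--             j += 1
--         v = flat[i]
--         if v < 1 or v > table_count:
--             out_of_range.append(v)
--         else:
--             present.append(v)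
--         if j - i > 1:
--             duplicates.append(v)
--         i = j
--
--     if out_of_range:
--         errors.append(
--             f"レイアウトに範囲外のテーブル番号があります: {', '.join(str(no) for no in out_of_range)}"
--         )
--     if duplicates:
--         errors.append(
--             f"レイアウトに重複テーブル番号があります: {', '.join(str(no) for no in duplicates)}"
--         )
--
--     # two-pointer merge of the sorted present values against 1..table_count
--     missing: list[int] = []
--     k = 0
--     for m in range(1, table_count + 1):
--         if k < len(present) and present[k] == m:
--             k += 1
--         else:
--             missing.append(m)
--     if missing:
--         errors.append(
--             f"レイアウト未指定のテーブルがあります: {', '.join(str(no) for no in missing)}"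
--         )
--     return errors
-- ===== Notes on version B (the rewrite author's own statement) =====
-- stated objective: alternative
-- what changed: B sorts the flattened list once and replaces A's three set-comprehension rescans (including quadratic flat.count) with a single run-length scan over the sorted list that classifies each distinct value as out-of-range/present/duplicate, plus a two-pointer merge of the sorted present values against range(1, table_count+1) for missing; no sets and no per-category sorting.
import Mathlib
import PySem

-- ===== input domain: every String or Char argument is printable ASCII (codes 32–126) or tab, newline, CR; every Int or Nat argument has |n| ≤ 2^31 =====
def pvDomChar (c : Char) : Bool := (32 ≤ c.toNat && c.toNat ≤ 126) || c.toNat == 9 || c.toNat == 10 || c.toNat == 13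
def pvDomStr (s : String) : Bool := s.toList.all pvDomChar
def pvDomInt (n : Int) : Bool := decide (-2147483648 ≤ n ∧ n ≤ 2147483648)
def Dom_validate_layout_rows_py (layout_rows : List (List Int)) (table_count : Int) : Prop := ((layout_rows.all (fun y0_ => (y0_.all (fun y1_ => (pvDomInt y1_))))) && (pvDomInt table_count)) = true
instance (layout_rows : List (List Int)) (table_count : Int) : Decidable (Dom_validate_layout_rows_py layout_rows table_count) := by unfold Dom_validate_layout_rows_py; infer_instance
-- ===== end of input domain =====

-- B sorts the flattened list once, replaces A's three set-comprehension rescans by a single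
-- run-length scan over the sorted list plus a two-pointer merge for the missing numbers
-- (objective: alternative).

def pvLabels : List String := ["前列（スクリーン側）", "中列", "後列（後方）"]
def pvLimits : List Int := [4, 5, 4]
def pvLenError : String := "レイアウト行数が不正です。前列・中列・後列の3行を設定してください。"

-- the per-row limit loop, textually identical in A and B (both Pythons contain it verbatim)
def pvRowLimitErrors (layout_rows : List (List Int)) : List String :=
  (PySem.List.enumerate (List.zip layout_rows pvLimits) 0).foldl
    (fun errs p =>
      if PySem.List.len p.2.1 > p.2.2 then
        errs ++ [PySem.List.pyGetD pvLabels p.1 "" ++ "は最大" ++ PySem.Int.toStr p.2.2 ++ "テーブルまでです。"]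
      else errs) []

def pvJoinInts (l : List Int) : String := PySem.Str.join ", " (l.map PySem.Int.toStr)

-- ===== PORT A =====
def validate_layout_rows_py (layout_rows : List (List Int)) (table_count : Int) : List String :=
  if layout_rows.length ≠ 3 then [pvLenError]
  else
    let errors := pvRowLimitErrors layout_rows
    let flat := layout_rows.flatMap (fun row => row)
    let out_of_range := PySem.List.sorted (PySem.Set.ofList (flat.filter (fun no => no < 1 || no > table_count))) (fun x => x) false
    let errors := if out_of_range ≠ [] then errors ++ ["レイアウトに範囲外のテーブル番号があります: " ++ pvJoinInts out_of_range] else errors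
    let duplicates := PySem.List.sorted (PySem.Set.ofList (flat.filter (fun no => flat.count no > 1))) (fun x => x) false
    let errors := if duplicates ≠ [] then errors ++ ["レイアウトに重複テーブル番号があります: " ++ pvJoinInts duplicates] else errors
    let expected := PySem.Set.ofList (PySem.List.pyRange 1 (table_count + 1) 1)
    let provided := PySem.Set.ofList flat
    let missing := PySem.List.sorted (PySem.Set.diff expected provided) (fun x => x) false
    let errors := if missing ≠ [] then errors ++ ["レイアウト未指定のテーブルがあります: " ++ pvJoinInts missing] else errors
    errors

-- ===== PORT B =====
-- B's while-loop run-length scan over the sorted list: the inner 'while flat[j] == flat[i]'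
-- is the takeWhile/dropWhile split of the current run; returns (out_of_range, present, duplicates)
def pvScan (s : List Int) (tc : Int) : List Int × List Int × List Int :=
  match s with
  | [] => ([], [], [])
  | v :: t =>
    let run := t.takeWhile (fun x => x == v)
    let rest := t.dropWhile (fun x => x == v)
    let r := pvScan rest tc
    ((if v < 1 || v > tc then v :: r.1 else r.1),
     (if v < 1 || v > tc then r.2.1 else v :: r.2.1),
     (if run.length ≥ 1 then v :: r.2.2 else r.2.2))
  termination_by s.length
  decreasing_by
    simp only [List.length_cons]
    exact Nat.lt_succ_of_le (List.length_dropWhile_le _ _)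

-- B's 'for m in range(1, table_count+1)' two-pointer merge against the sorted present list
def pvMerge (pres : List Int) (rng : List Int) : List Int :=
  match rng with
  | [] => []
  | m :: r =>
    match pres with
    | q :: qs => if q == m then pvMerge qs r else m :: pvMerge (q :: qs) r
    | [] => m :: pvMerge [] r

def validate_layout_rows_py_alt (layout_rows : List (List Int)) (table_count : Int) : List String :=
  if layout_rows.length ≠ 3 then [pvLenError]
  else
    let errors := pvRowLimitErrors layout_rows
    let flat := PySem.List.sorted (layout_rows.flatMap (fun row => row)) (fun x => x) false
    let scanned := pvScan flat table_count
    let errors := if scanned.1 ≠ [] then errors ++ ["レイアウトに範囲外のテーブル番号があります: " ++ pvJoinInts scanned.1] else errors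
    let errors := if scanned.2.2 ≠ [] then errors ++ ["レイアウトに重複テーブル番号があります: " ++ pvJoinInts scanned.2.2] else errors
    let missing := pvMerge scanned.2.1 (PySem.List.pyRange 1 (table_count + 1) 1)
    let errors := if missing ≠ [] then errors ++ ["レイアウト未指定のテーブルがあります: " ++ pvJoinInts missing] else errors
    errors

-- ===== PRECONDITION & SPEC =====
def Spec_validate_layout_rows_py (layout_rows : List (List Int)) (table_count : Int) (out : List String) : Prop := out = validate_layout_rows_py_alt layout_rows table_count
instance (layout_rows : List (List Int)) (table_count : Int) (out : List String) : Decidable (Spec_validate_layout_rows_py layout_rows table_count out) := by unfold Spec_validate_layout_rows_py; infer_instance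

-- ===== CLAIM (what is proved, stated in full; the proofs are below) =====
def Claim_equal_validate_layout_rows_py : Prop := ∀ (layout_rows : List (List Int)) (table_count : Int), Dom_validate_layout_rows_py layout_rows table_count → Spec_validate_layout_rows_py layout_rows table_count (validate_layout_rows_py layout_rows table_count)

-- ===== LEMMAS AND PROOFS =====

-- one-step unfolding of the scan (the WF equation)
lemma pvScan_cons (v : Int) (t : List Int) (tc : Int) :
    pvScan (v :: t) tc =
      ((if v < 1 || v > tc then v :: (pvScan (t.dropWhile (fun x => x == v)) tc).1 else (pvScan (t.dropWhile (fun x => x == v)) tc).1),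
       (if v < 1 || v > tc then (pvScan (t.dropWhile (fun x => x == v)) tc).2.1 else v :: (pvScan (t.dropWhile (fun x => x == v)) tc).2.1),
       (if (t.takeWhile (fun x => x == v)).length ≥ 1 then v :: (pvScan (t.dropWhile (fun x => x == v)) tc).2.2 else (pvScan (t.dropWhile (fun x => x == v)) tc).2.2)) := by
  rw [pvScan]

-- the first element surviving dropWhile fails the predicate
lemma pv_dropWhile_head (p : Int → Bool) : ∀ (t : List Int) (w : Int) (ws : List Int),
    t.dropWhile p = w :: ws → p w = false := by
  intro t
  induction t with
  | nil => intro w ws h; simp [List.dropWhile] at h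
  | cons a t ih =>
    intro w ws h
    rw [List.dropWhile_cons] at h
    by_cases hp : p a = true
    · rw [if_pos hp] at h; exact ih w ws h
    · rw [if_neg hp] at h
      injection h with h1 h2
      subst h1
      simpa using hp

-- in a ≤-sorted list, everything after the leading run is strictly bigger than the head
lemma pv_rest_gt (v : Int) (t : List Int) (h : (v :: t).Pairwise (· ≤ ·)) :
    ∀ x ∈ t.dropWhile (fun x => x == v), v < x := by
  intro x hx
  cases hrest : t.dropWhile (fun y => y == v) with
  | nil => rw [hrest] at hx; simp at hx
  | cons w ws =>
    have hw : ((w == v) : Bool) = false := pv_dropWhile_head _ t w ws hrest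
    have hwne : w ≠ v := by simpa using hw
    have hwmem : w ∈ t := (List.dropWhile_sublist _).subset (by rw [hrest]; exact List.mem_cons_self ..)
    have hwle : v ≤ w := (List.pairwise_cons.mp h).1 w hwmem
    have hvw : v < w := lt_of_le_of_ne hwle (Ne.symm hwne)
    have hpw : (w :: ws).Pairwise (· ≤ ·) :=
      hrest ▸ List.Pairwise.sublist (List.dropWhile_sublist _) h.of_cons
    rw [hrest] at hx
    rcases List.mem_cons.mp hx with rfl | hxs
    · exact hvw
    · exact lt_of_lt_of_le hvw ((List.pairwise_cons.mp hpw).1 x hxs)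

-- the run-length scan of a ≤-sorted list: strictly increasing outputs with the expected memberships
lemma pvScan_spec : ∀ (n : Nat) (s : List Int), s.length ≤ n → ∀ (tc : Int), s.Pairwise (· ≤ ·) →
    (((pvScan s tc).1.Pairwise (· < ·) ∧ ∀ x, x ∈ (pvScan s tc).1 ↔ x ∈ s ∧ (x < 1 ∨ tc < x)) ∧
     ((pvScan s tc).2.1.Pairwise (· < ·) ∧ ∀ x, x ∈ (pvScan s tc).2.1 ↔ x ∈ s ∧ (1 ≤ x ∧ x ≤ tc)) ∧
     ((pvScan s tc).2.2.Pairwise (· < ·) ∧ ∀ x, x ∈ (pvScan s tc).2.2 ↔ 1 < (s.count x))) := by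
  intro n
  induction n with
  | zero =>
    intro s hlen tc _
    have hnil : s = [] := List.eq_nil_of_length_eq_zero (Nat.le_zero.mp hlen)
    subst hnil; simp [pvScan]
  | succ n ih =>
    intro s hlen tc hs
    match s with
    | [] => simp [pvScan]
    | v :: t =>
      have hteq : t.takeWhile (fun x => x == v) ++ t.dropWhile (fun x => x == v) = t :=
        List.takeWhile_append_dropWhile
      have hrest_len : (t.dropWhile (fun x => x == v)).length ≤ n := by
        have h1 := List.length_dropWhile_le (fun x => x == v) t
        have h2 : t.length + 1 ≤ n + 1 := by simpa using hlen
        omega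
      have hrest_pw : (t.dropWhile (fun x => x == v)).Pairwise (· ≤ ·) :=
        List.Pairwise.sublist (List.dropWhile_sublist _) hs.of_cons
      have hgt : ∀ x ∈ t.dropWhile (fun x => x == v), v < x := pv_rest_gt v t hs
      have hrunv : ∀ x ∈ t.takeWhile (fun x => x == v), x = v := by
        intro x hx
        have := List.mem_takeWhile_imp hx
        simpa using this
      obtain ⟨⟨hpw1, hmem1⟩, ⟨hpw2, hmem2⟩, hpw3, hmem3⟩ :=
        ih (t.dropWhile (fun x => x == v)) hrest_len tc hrest_pw
      have hvnotrest : v ∉ t.dropWhile (fun x => x == v) := fun hv => lt_irrefl v (hgt v hv)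
      have hmem_s : ∀ x, x ∈ v :: t ↔ x = v ∨ x ∈ t.dropWhile (fun x => x == v) := by
        intro x
        constructor
        · intro hx
          rcases List.mem_cons.mp hx with rfl | hxt
          · exact Or.inl rfl
          · rw [← hteq] at hxt
            rcases List.mem_append.mp hxt with h | h
            · exact Or.inl (hrunv x h)
            · exact Or.inr h
        · intro hx
          rcases hx with rfl | hx
          · exact List.mem_cons_self ..
          · exact List.mem_cons_of_mem _ (by rw [← hteq]; exact List.mem_append_right _ hx)
      have hrun_count : (t.takeWhile (fun x => x == v)).count v = (t.takeWhile (fun x => x == v)).length :=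
        List.count_eq_length.mpr (fun x hx => (hrunv x hx).symm)
      have hrest_count_v : (t.dropWhile (fun x => x == v)).count v = 0 := List.count_eq_zero.mpr hvnotrest
      have hcount_v : (v :: t).count v = (t.takeWhile (fun x => x == v)).length + 1 := by
        have hcv : (v :: (t.takeWhile (fun x => x == v) ++ t.dropWhile (fun x => x == v))).count v
            = (t.takeWhile (fun x => x == v)).length + 1 := by
          rw [List.count_cons_self, List.count_append, hrun_count, hrest_count_v]
        rwa [hteq] at hcv
      have hcount_ne : ∀ x, x ≠ v → (v :: t).count x = (t.dropWhile (fun x => x == v)).count x := by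
        intro x hx
        have hrx : (t.takeWhile (fun x => x == v)).count x = 0 :=
          List.count_eq_zero.mpr (fun hm => hx (hrunv x hm))
        have hcv : (v :: (t.takeWhile (fun x => x == v) ++ t.dropWhile (fun x => x == v))).count x
            = (t.dropWhile (fun x => x == v)).count x := by
          rw [List.count_cons_of_ne (Ne.symm hx), List.count_append, hrx, Nat.zero_add]
        rwa [hteq] at hcv
      rw [pvScan_cons]
      refine ⟨⟨?_, ?_⟩, ⟨?_, ?_⟩, ?_, ?_⟩
      · -- out_of_range pairwise
        dsimp only
        split_ifs with hc
        · exact List.pairwise_cons.mpr ⟨fun y hy => hgt y ((hmem1 y).mp hy).1, hpw1⟩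
        · exact hpw1
      · -- out_of_range membership
        intro x
        dsimp only
        rw [hmem_s x]
        split_ifs with hc
        · have hv : v < 1 ∨ tc < v := by simpa using hc
          rw [List.mem_cons, hmem1 x]
          constructor
          · rintro (rfl | ⟨h1, h2⟩)
            · exact ⟨Or.inl rfl, hv⟩
            · exact ⟨Or.inr h1, h2⟩
          · rintro ⟨rfl | h1, h2⟩
            · exact Or.inl rfl
            · exact Or.inr ⟨h1, h2⟩
        · have hv : ¬(v < 1 ∨ tc < v) := fun h => hc (by simpa using h)
          rw [hmem1 x]
          constructor
          · rintro ⟨h1, h2⟩; exact ⟨Or.inr h1, h2⟩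
          · rintro ⟨rfl | h1, h2⟩
            · exact absurd h2 hv
            · exact ⟨h1, h2⟩
      · -- present pairwise
        dsimp only
        split_ifs with hc
        · exact hpw2
        · exact List.pairwise_cons.mpr ⟨fun y hy => hgt y ((hmem2 y).mp hy).1, hpw2⟩
      · -- present membership
        intro x
        dsimp only
        rw [hmem_s x]
        split_ifs with hc
        · have hv : v < 1 ∨ tc < v := by simpa using hc
          rw [hmem2 x]
          constructor
          · rintro ⟨h1, h2⟩; exact ⟨Or.inr h1, h2⟩
          · rintro ⟨rfl | h1, h2⟩
            · rcases hv with h | h <;> omega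
            · exact ⟨h1, h2⟩
        · have hv : ¬(v < 1 ∨ tc < v) := fun h => hc (by simpa using h)
          rw [not_or] at hv
          rw [List.mem_cons, hmem2 x]
          constructor
          · rintro (rfl | ⟨h1, h2⟩)
            · exact ⟨Or.inl rfl, by omega⟩
            · exact ⟨Or.inr h1, h2⟩
          · rintro ⟨rfl | h1, h2⟩
            · exact Or.inl rfl
            · exact Or.inr ⟨h1, h2⟩
      · -- duplicates pairwise
        dsimp only
        split_ifs with hc
        · refine List.pairwise_cons.mpr ⟨fun y hy => ?_, hpw3⟩
          have hy1 := (hmem3 y).mp hy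
          have hy2 : y ∈ t.dropWhile (fun x => x == v) := List.count_pos_iff.mp (by omega)
          exact hgt y hy2
        · exact hpw3
      · -- duplicates membership
        intro x
        dsimp only
        by_cases hxv : x = v
        · subst hxv
          have hvno : x ∉ (pvScan (t.dropWhile (fun y => y == x)) tc).2.2 := by
            intro hv
            have h1 := (hmem3 x).mp hv
            have h2 : x ∈ t.dropWhile (fun y => y == x) := List.count_pos_iff.mp (by omega)
            exact hvnotrest h2
          rw [hcount_v]
          split_ifs with hc
          · rw [List.mem_cons]
            constructor
            · intro _; omega
            · intro _; exact Or.inl rfl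
          · constructor
            · intro h; exact absurd h hvno
            · intro h; omega
        · rw [hcount_ne x hxv, ← hmem3 x]
          split_ifs with hc
          · rw [List.mem_cons]
            constructor
            · rintro (rfl | h)
              · exact absurd rfl hxv
              · exact h
            · exact fun h => Or.inr h
          · rfl

-- the two-pointer merge equals the membership filter on the range
lemma pvMerge_eq_filter : ∀ (rng pres : List Int), rng.Pairwise (· < ·) →
    pres.Pairwise (· < ·) → (∀ q ∈ pres, q ∈ rng) →
    pvMerge pres rng = rng.filter (fun m => decide (m ∉ pres)) := by
  intro rng
  induction rng with
  | nil => intro pres _ _ _; cases pres <;> simp [pvMerge]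
  | cons m r ih =>
    intro pres hr hp hsub
    match pres with
    | [] =>
      rw [pvMerge, ih [] hr.of_cons (by simp) (by simp)]
      simp
    | q :: qs =>
      have hq : q ∈ m :: r := hsub q (List.mem_cons_self ..)
      by_cases hqm : q = m
      · subst hqm
        have hqs_sub : ∀ a ∈ qs, a ∈ r := by
          intro a ha
          have h1 : a ∈ q :: r := hsub a (List.mem_cons_of_mem _ ha)
          have h2 : q < a := (List.pairwise_cons.mp hp).1 a ha
          rcases List.mem_cons.mp h1 with rfl | h
          · omega
          · exact h
        rw [pvMerge]
        simp only [beq_self_eq_true, if_true]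
        rw [ih qs hr.of_cons hp.of_cons hqs_sub]
        rw [List.filter_cons]
        have hmem : decide (q ∉ q :: qs) = false := by simp
        rw [hmem]
        simp only [Bool.false_eq_true, if_false]
        apply List.filter_congr
        intro x hx
        have hqx : q < x := (List.pairwise_cons.mp hr).1 x hx
        simp only [decide_eq_decide, List.mem_cons]
        constructor
        · intro h h2
          rcases h2 with rfl | h2
          · omega
          · exact h h2
        · intro h h2
          exact h (Or.inr h2)
      · have hqr : q ∈ r := by
          rcases List.mem_cons.mp hq with rfl | h
          · exact absurd rfl hqm
          · exact h
        have hmq : m < q := (List.pairwise_cons.mp hr).1 q hqr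
        have hsub' : ∀ a ∈ q :: qs, a ∈ r := by
          intro a ha
          have h1 : a ∈ m :: r := hsub a ha
          have h2 : q ≤ a := by
            rcases List.mem_cons.mp ha with rfl | h
            · exact le_refl a
            · exact le_of_lt ((List.pairwise_cons.mp hp).1 a h)
          rcases List.mem_cons.mp h1 with rfl | h
          · omega
          · exact h
        have hmnot : m ∉ q :: qs := by
          intro hm
          have h2 : q ≤ m := by
            rcases List.mem_cons.mp hm with rfl | h
            · exact le_refl m
            · exact le_of_lt ((List.pairwise_cons.mp hp).1 m h)
          omega
        rw [pvMerge]
        have hbeq : (q == m) = false := by simpa using hqm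
        rw [hbeq]
        simp only [Bool.false_eq_true, if_false]
        rw [ih (q :: qs) hr.of_cons hp hsub', List.filter_cons]
        have hkeep : decide (m ∉ q :: qs) = true := by simpa using hmnot
        rw [hkeep]
        simp

-- ===== VERDICT (by name: the statement is the Claim_ definition above) =====
theorem validate_layout_rows_py_spec : Claim_equal_validate_layout_rows_py := by
  intro layout_rows table_count _hdom
  unfold Spec_validate_layout_rows_py
  by_cases hlen : layout_rows.length ≠ 3
  · simp only [validate_layout_rows_py, validate_layout_rows_py_alt, if_pos hlen]
  · simp only [validate_layout_rows_py, validate_layout_rows_py_alt, if_neg hlen]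
    set flat := layout_rows.flatMap (fun row => row) with hflat
    set srt := PySem.List.sorted flat (fun x => x) false with hsrt
    have hperm : srt.Perm flat := PySem.List.sorted_perm ..
    have hspw : srt.Pairwise (· ≤ ·) := by
      have := PySem.List.sorted_pairwise (xs := flat) (key := fun x => x)
      simpa using this
    obtain ⟨⟨hpw1, hmem1⟩, ⟨hpw2, hmem2⟩, hpw3, hmem3⟩ :=
      pvScan_spec srt.length srt le_rfl table_count hspw
    have E1 : PySem.List.sorted (PySem.Set.ofList (flat.filter (fun no => no < 1 || no > table_count))) (fun x => x) false
        = (pvScan srt table_count).1 := by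
      apply PySem.List.sorted_eq_of_perm_of_pairwise_lt
      · rw [List.perm_ext_iff_of_nodup (hpw1.imp (fun h => ne_of_lt h)) (PySem.Set.nodup_ofList _)]
        intro a
        rw [hmem1 a]
        simp [PySem.Set.mem_ofList, List.mem_filter, hperm.mem_iff]
      · exact hpw1
    have E2 : PySem.List.sorted (PySem.Set.ofList (flat.filter (fun no => flat.count no > 1))) (fun x => x) false
        = (pvScan srt table_count).2.2 := by
      apply PySem.List.sorted_eq_of_perm_of_pairwise_lt
      · rw [List.perm_ext_iff_of_nodup (hpw3.imp (fun h => ne_of_lt h)) (PySem.Set.nodup_ofList _)]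
        intro a
        rw [hmem3 a, hperm.count_eq]
        simp only [PySem.Set.mem_ofList, List.mem_filter, decide_eq_true_eq]
        constructor
        · intro h
          exact ⟨List.count_pos_iff.mp (by omega), h⟩
        · exact fun h => h.2
      · exact hpw3
    have hsubp : ∀ q ∈ (pvScan srt table_count).2.1, q ∈ PySem.List.pyRange 1 (table_count + 1) 1 := by
      intro q hq
      have h := (hmem2 q).mp hq
      rw [PySem.List.mem_pyRange_one]
      omega
    have hmerge : pvMerge (pvScan srt table_count).2.1 (PySem.List.pyRange 1 (table_count + 1) 1)
        = (PySem.List.pyRange 1 (table_count + 1) 1).filter (fun m => decide (m ∉ (pvScan srt table_count).2.1)) :=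
      pvMerge_eq_filter _ _ (PySem.List.pairwise_lt_pyRange_one _ _) hpw2 hsubp
    have E3 : PySem.List.sorted (PySem.Set.diff (PySem.Set.ofList (PySem.List.pyRange 1 (table_count + 1) 1)) (PySem.Set.ofList flat)) (fun x => x) false
        = pvMerge (pvScan srt table_count).2.1 (PySem.List.pyRange 1 (table_count + 1) 1) := by
      rw [hmerge]
      apply PySem.List.sorted_eq_of_perm_of_pairwise_lt
      · rw [List.perm_ext_iff_of_nodup ((PySem.List.nodup_pyRange_one _ _).filter _)
            (PySem.Set.nodup_diff _ _ (PySem.Set.nodup_ofList _))]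
        intro a
        simp only [List.mem_filter, PySem.Set.mem_diff, PySem.Set.mem_ofList,
          PySem.List.mem_pyRange_one, hmem2 a, hperm.mem_iff, decide_eq_true_eq]
        constructor
        · rintro ⟨h1, h2⟩
          exact ⟨h1, fun hm => h2 ⟨hm, by omega⟩⟩
        · rintro ⟨h1, h2⟩
          exact ⟨h1, fun hm => h2 hm.1⟩
      · exact (PySem.List.pairwise_lt_pyRange_one _ _).filter _
    rw [E1, E2, E3]
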